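-- pv_equiv track=rewrite | github.com/Applied-AI-Research-Lab/An-Explainable-AI-Multi-Agent-Recommender-System-for-Financial-Document-Access-Control | 06_agentic_analysis.py | orchestrator_overrode_majority
-- ===== SOURCE A (Python) =====
-- from collections import Counter
--
-- def orchestrator_overrode_majority(row):
--     """Check if orchestrator chose differently from majority vote"""
--     if 'agent_agreement' not in row:
--         return False
--     agents = ['finbert_pred', 'bert_pred', 'gpt_pred']
--     agent_preds = [row[agent] for agent in agents if agent in row]
--     if len(agent_preds) < 3:
--         return False
--     majority_vote = Counter(agent_preds).most_common(1)[0][0]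
--     return row['orchestrator_pred'] != majority_vote
-- ===== SOURCE B (Python) =====
-- def orchestrator_overrode_majority(row):
--     """Check if orchestrator chose differently from majority vote"""
--     if 'agent_agreement' not in row:
--         return False
--     if not all(k in row for k in ('finbert_pred', 'bert_pred', 'gpt_pred')):
--         return False
--     f, b, g = row['finbert_pred'], row['bert_pred'], row['gpt_pred']
--     # Majority of three: if the last two agree they win; otherwise the first
--     # value wins (it has a partner, or all three are distinct and Counter's
--     # first-encountered tie-break picks it anyway).
--     majority = b if b == g else f
--     return row['orchestrator_pred'] != majority
-- ===== Notes on version B (the rewrite author's own statement) =====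
-- stated objective: simpler
-- what changed: Replaces the Counter frequency table and most_common tie-break with a single comparison (last two agree -> they win, else the first value wins), fetching the three predictions directly instead of building a filtered list.
import Mathlib
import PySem

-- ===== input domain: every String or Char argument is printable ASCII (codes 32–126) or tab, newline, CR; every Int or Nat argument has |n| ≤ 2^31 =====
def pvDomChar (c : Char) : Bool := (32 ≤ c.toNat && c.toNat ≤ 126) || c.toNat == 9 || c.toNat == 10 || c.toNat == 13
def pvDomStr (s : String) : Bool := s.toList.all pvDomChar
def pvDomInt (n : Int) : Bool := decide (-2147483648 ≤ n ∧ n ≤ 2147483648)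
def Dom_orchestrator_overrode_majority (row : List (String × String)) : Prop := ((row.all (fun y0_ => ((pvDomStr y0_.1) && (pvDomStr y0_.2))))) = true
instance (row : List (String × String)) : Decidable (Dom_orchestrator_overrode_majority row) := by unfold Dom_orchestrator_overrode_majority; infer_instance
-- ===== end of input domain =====

-- B replaces the Counter/most_common majority computation with one comparison; objective: simpler.

-- ===== PORT A =====
-- most_common(1)[0][0]: first item of the counter with maximal count (ties keep first-encountered order).
def pvMostCommon1Key (items : List (String × Int)) : String :=
  match items with
  | [] => ""           -- unreachable here: agent_preds is nonempty
  | kv :: rest => (rest.foldl (fun best x => if x.2 > best.2 then x else best) kv).1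

def orchestrator_overrode_majority (row : List (String × String)) : Bool :=
  let d := PySem.Dict.mk row
  if (d.contains "agent_agreement") = false then false
  else
    let agents := ["finbert_pred", "bert_pred", "gpt_pred"]
    let agent_preds := agents.filterMap (fun a => d.get? a)
    if agent_preds.length < 3 then false
    else
      let majority_vote := pvMostCommon1Key (PySem.Dict.counter agent_preds).items
      (d.getD "orchestrator_pred" "") != majority_vote

-- ===== PORT B =====
def orchestrator_overrode_majority_alt (row : List (String × String)) : Bool :=
  let d := PySem.Dict.mk row
  if (d.contains "agent_agreement") = false then false
  else if !(["finbert_pred", "bert_pred", "gpt_pred"].all (fun k => d.contains k)) then false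
  else
    let f := d.getD "finbert_pred" ""
    let b := d.getD "bert_pred" ""
    let g := d.getD "gpt_pred" ""
    let majority := if b == g then b else f
    (d.getD "orchestrator_pred" "") != majority

-- ===== PRECONDITION & SPEC =====
-- Pre_ excludes exactly the rows where A raises KeyError: 'agent_agreement' and all three
-- agent keys present but 'orchestrator_pred' missing (B raises there too).
def Pre_orchestrator_overrode_majority (row : List (String × String)) : Prop :=
  ((PySem.Dict.mk row).contains "agent_agreement"
    ∧ (PySem.Dict.mk row).contains "finbert_pred"
    ∧ (PySem.Dict.mk row).contains "bert_pred"
    ∧ (PySem.Dict.mk row).contains "gpt_pred")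
  → (PySem.Dict.mk row).contains "orchestrator_pred"

instance (row : List (String × String)) : Decidable (Pre_orchestrator_overrode_majority row) := by
  unfold Pre_orchestrator_overrode_majority; infer_instance

def pvWitness_orchestrator_overrode_majority : (List (String × String)) :=
  [("agent_agreement", "yes"), ("finbert_pred", "pos"), ("bert_pred", "neg"),
   ("gpt_pred", "neg"), ("orchestrator_pred", "pos")]

def Spec_orchestrator_overrode_majority (row : List (String × String)) (out : Bool) : Prop := out = orchestrator_overrode_majority_alt row
instance (row : List (String × String)) (out : Bool) : Decidable (Spec_orchestrator_overrode_majority row out) := by unfold Spec_orchestrator_overrode_majority; infer_instance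

-- ===== CLAIM (what is proved, stated in full; the proofs are below) =====
def Claim_equal_orchestrator_overrode_majority : Prop := ∀ (row : List (String × String)), Dom_orchestrator_overrode_majority row → Pre_orchestrator_overrode_majority row → Spec_orchestrator_overrode_majority row (orchestrator_overrode_majority row)

-- ===== LEMMAS AND PROOFS =====

-- A's majority of three values equals B's single comparison.
lemma pvMaj3 (f b g : String) :
    pvMostCommon1Key (PySem.Dict.counter [f, b, g]).items = (if b == g then b else f) := by
  by_cases hfb : f = b <;> by_cases hfg : f = g <;> by_cases hbg : b = g <;>
    subst_vars <;>
    simp_all [pvMostCommon1Key, PySem.Dict.counter, PySem.Dict.modify,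
      PySem.Dict.empty, List.foldl, beq_iff_eq, PySem.Dict.insert, PySem.Dict.getD,
      PySem.Dict.get?]

-- ===== VERDICT (by name: the statement is the Claim_ definition above) =====
theorem orchestrator_overrode_majority_spec : Claim_equal_orchestrator_overrode_majority := by
  intro row _ _
  unfold Spec_orchestrator_overrode_majority orchestrator_overrode_majority orchestrator_overrode_majority_alt
  rcases hA : (PySem.Dict.mk row).get? "agent_agreement" with _ | va <;>
  rcases hF : (PySem.Dict.mk row).get? "finbert_pred" with _ | f <;>
  rcases hB : (PySem.Dict.mk row).get? "bert_pred" with _ | b <;>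
  rcases hG : (PySem.Dict.mk row).get? "gpt_pred" with _ | g <;>
    simp_all [PySem.Dict.contains_eq_isSome_get?, List.filterMap, pvMaj3,
      PySem.Dict.getD_eq_get?_getD]
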